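-- pv_equiv track=rewrite | github.com/Harsh-BH/bcg-dashboard | mock_data/generate_large.py | _grade_band
-- ===== SOURCE A (Python) =====
-- GRADES_IC = ["A1.1","A1.2","A1.3","PT","AT","NAPS","NATS"]
--
-- GRADES_TL = ["A2.1","A2.2","A3","A4","A5"]
--
-- GRADES_M1 = ["E1","E2"]
--
-- GRADES_M2 = ["E3","E4"]
--
-- GRADES_M3 = ["E5","E6"]
--
-- def _grade_band(grade):
--     g = grade.upper()
--     if g in {g2.upper() for g2 in GRADES_IC}:  return "IC"
--     if g in {g2.upper() for g2 in GRADES_TL}:  return "TL"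
--     if g in {g2.upper() for g2 in GRADES_M1}:  return "M1"
--     if g in {g2.upper() for g2 in GRADES_M2}:  return "M2"
--     if g in {g2.upper() for g2 in GRADES_M3}:  return "M3"
--     return "CXO"
-- ===== SOURCE B (Python) =====
-- # B: a character-level decision tree on the uppercased grade (length, then individual
-- # characters), deriving the M-band digit arithmetically from the E-grade digit instead
-- # of testing membership in grade tables.
-- def _grade_band(grade):
--     g = grade.upper()
--     n = len(g)
--     if n == 2:
--         c0, c1 = g[0], g[1]
--         if c0 == "E" and "1" <= c1 <= "6":
--             return "M" + chr(ord("0") + (ord(c1) - ord("0") + 1) // 2)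
--         if c1 == "T" and (c0 == "P" or c0 == "A"):
--             return "IC"
--         if c0 == "A" and "3" <= c1 <= "5":
--             return "TL"
--     elif n == 4:
--         if g[0] == "N" and g[1] == "A" and g[3] == "S" and (g[2] == "P" or g[2] == "T"):
--             return "IC"
--         if g[0] == "A" and g[2] == ".":
--             if g[1] == "1" and "1" <= g[3] <= "3":
--                 return "IC"
--             if g[1] == "2" and ("1" == g[3] or "2" == g[3]):
--                 return "TL"
--     return "CXO"
-- ===== Notes on version B (the rewrite author's own statement) =====
-- stated objective: alternative
-- what changed: Replaces A's five sequential set-membership tests (each rebuilding an uppercased set per call) with a character-level decision tree on the uppercased grade (dispatch on length, then on individual characters), computing the M-band digit arithmetically from the E-grade digit instead of looking the grade up in any table.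
import Mathlib
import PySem

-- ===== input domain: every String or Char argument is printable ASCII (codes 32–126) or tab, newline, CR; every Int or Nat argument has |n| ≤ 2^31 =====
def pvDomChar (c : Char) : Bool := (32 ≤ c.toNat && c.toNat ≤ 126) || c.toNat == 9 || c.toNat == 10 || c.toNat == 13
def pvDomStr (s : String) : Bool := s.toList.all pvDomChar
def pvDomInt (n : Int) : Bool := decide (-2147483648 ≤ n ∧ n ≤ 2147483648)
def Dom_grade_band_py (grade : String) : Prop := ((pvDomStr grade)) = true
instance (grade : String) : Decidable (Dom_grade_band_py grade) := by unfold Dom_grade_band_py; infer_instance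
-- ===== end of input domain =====

-- B replaces A's five set-membership branches by a character-level decision tree on the
-- uppercased grade (length, then individual characters), computing the M-band digit
-- arithmetically from the E-grade digit; return values agree on all strings.

-- ===== PORT A =====
def GRADES_IC : List String := ["A1.1","A1.2","A1.3","PT","AT","NAPS","NATS"]
def GRADES_TL : List String := ["A2.1","A2.2","A3","A4","A5"]
def GRADES_M1 : List String := ["E1","E2"]
def GRADES_M2 : List String := ["E3","E4"]
def GRADES_M3 : List String := ["E5","E6"]

def grade_band_py (grade : String) : String :=
  let g := PySem.Str.upper grade
  if PySem.Set.contains (PySem.Set.ofList (GRADES_IC.map PySem.Str.upper)) g then "IC"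
  else if PySem.Set.contains (PySem.Set.ofList (GRADES_TL.map PySem.Str.upper)) g then "TL"
  else if PySem.Set.contains (PySem.Set.ofList (GRADES_M1.map PySem.Str.upper)) g then "M1"
  else if PySem.Set.contains (PySem.Set.ofList (GRADES_M2.map PySem.Str.upper)) g then "M2"
  else if PySem.Set.contains (PySem.Set.ofList (GRADES_M3.map PySem.Str.upper)) g then "M3"
  else "CXO"

-- ===== PORT B =====
-- The body of Source B after g = grade.upper(): "n = len(g); if n == 2: c0, c1 = g[0], g[1]; …"
-- is transliterated as a match on g's character list (the match pattern IS the length test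
-- plus the indexing).  chr/ord are ported by hand as Char.ofNat/Char.toNat (exact: inside
-- the guard ord(c1) is 49..54, so the Nat subtraction and division equal Python's).
def pvBandOf (l : List Char) : String :=
  match l with
  | [c0, c1] =>
    if c0 = 'E' ∧ '1' ≤ c1 ∧ c1 ≤ '6' then
      String.ofList ['M', Char.ofNat (48 + ((c1.toNat - 48 + 1) / 2))]
    else if c1 = 'T' ∧ (c0 = 'P' ∨ c0 = 'A') then "IC"
    else if c0 = 'A' ∧ '3' ≤ c1 ∧ c1 ≤ '5' then "TL"
    else "CXO"
  | [d0, d1, d2, d3] =>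
    if d0 = 'N' ∧ d1 = 'A' ∧ d3 = 'S' ∧ (d2 = 'P' ∨ d2 = 'T') then "IC"
    else if d0 = 'A' ∧ d2 = '.' then
      if d1 = '1' ∧ '1' ≤ d3 ∧ d3 ≤ '3' then "IC"
      else if d1 = '2' ∧ ('1' = d3 ∨ '2' = d3) then "TL"
      else "CXO"
    else "CXO"
  | _ => "CXO"

def grade_band_py_alt (grade : String) : String :=
  pvBandOf (PySem.Str.upper grade).toList

-- ===== PRECONDITION & SPEC =====
def Spec_grade_band_py (grade : String) (out : String) : Prop := out = grade_band_py_alt grade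
instance (grade : String) (out : String) : Decidable (Spec_grade_band_py grade out) := by unfold Spec_grade_band_py; infer_instance

-- ===== CLAIM (what is proved, stated in full; the proofs are below) =====
def Claim_equal_grade_band_py : Prop := ∀ (grade : String), Dom_grade_band_py grade → Spec_grade_band_py grade (grade_band_py grade)

-- ===== LEMMAS AND PROOFS =====
-- Both ports depend on the input only through s = upper grade; pvCoreEq compares them for every s.
lemma pvCharToNatInj {c d : Char} (h : c.toNat = d.toNat) : c = d :=
  Char.ext (UInt32.toNat_inj.mp h)
lemma pvCharLeIff (c d : Char) : (c ≤ d) ↔ c.toNat ≤ d.toNat := by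
  rw [Char.le_def, UInt32.le_iff_toNat_le]; rfl
lemma pvEqLit (s : String) (m : List Char) : (s = String.ofList m) ↔ s.toList = m := by
  constructor
  · intro h; subst h; simp
  · intro h; exact (String.ofList_eq.mpr h.symm).symm

lemma pvE_A1_1 (s : String) : (s = "A1.1") ↔ s.toList = ['A','1','.','1'] := pvEqLit s _
lemma pvE_A1_2 (s : String) : (s = "A1.2") ↔ s.toList = ['A','1','.','2'] := pvEqLit s _
lemma pvE_A1_3 (s : String) : (s = "A1.3") ↔ s.toList = ['A','1','.','3'] := pvEqLit s _
lemma pvE_PT (s : String) : (s = "PT") ↔ s.toList = ['P','T'] := pvEqLit s _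
lemma pvE_AT (s : String) : (s = "AT") ↔ s.toList = ['A','T'] := pvEqLit s _
lemma pvE_NAPS (s : String) : (s = "NAPS") ↔ s.toList = ['N','A','P','S'] := pvEqLit s _
lemma pvE_NATS (s : String) : (s = "NATS") ↔ s.toList = ['N','A','T','S'] := pvEqLit s _
lemma pvE_A2_1 (s : String) : (s = "A2.1") ↔ s.toList = ['A','2','.','1'] := pvEqLit s _
lemma pvE_A2_2 (s : String) : (s = "A2.2") ↔ s.toList = ['A','2','.','2'] := pvEqLit s _
lemma pvE_A3 (s : String) : (s = "A3") ↔ s.toList = ['A','3'] := pvEqLit s _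
lemma pvE_A4 (s : String) : (s = "A4") ↔ s.toList = ['A','4'] := pvEqLit s _
lemma pvE_A5 (s : String) : (s = "A5") ↔ s.toList = ['A','5'] := pvEqLit s _
lemma pvE_E1 (s : String) : (s = "E1") ↔ s.toList = ['E','1'] := pvEqLit s _
lemma pvE_E2 (s : String) : (s = "E2") ↔ s.toList = ['E','2'] := pvEqLit s _
lemma pvE_E3 (s : String) : (s = "E3") ↔ s.toList = ['E','3'] := pvEqLit s _
lemma pvE_E4 (s : String) : (s = "E4") ↔ s.toList = ['E','4'] := pvEqLit s _
lemma pvE_E5 (s : String) : (s = "E5") ↔ s.toList = ['E','5'] := pvEqLit s _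
lemma pvE_E6 (s : String) : (s = "E6") ↔ s.toList = ['E','6'] := pvEqLit s _
-- simp set: pvE_A1_1, pvE_A1_2, pvE_A1_3, pvE_PT, pvE_AT, pvE_NAPS, pvE_NATS, pvE_A2_1, pvE_A2_2, pvE_A3, pvE_A4, pvE_A5, pvE_E1, pvE_E2, pvE_E3, pvE_E4, pvE_E5, pvE_E6

lemma pvNotIn16 {c : Char} (h1 : ¬(c = '1')) (h2 : ¬(c = '2')) (h3 : ¬(c = '3'))
    (h4 : ¬(c = '4')) (h5 : ¬(c = '5')) (h6 : ¬(c = '6')) : ¬(('1':Char) ≤ c ∧ c ≤ '6') := by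
  rintro ⟨ha, hb⟩
  have k1 : c.toNat ≠ 49 := fun h => h1 (pvCharToNatInj (d := '1') h)
  have k2 : c.toNat ≠ 50 := fun h => h2 (pvCharToNatInj (d := '2') h)
  have k3 : c.toNat ≠ 51 := fun h => h3 (pvCharToNatInj (d := '3') h)
  have k4 : c.toNat ≠ 52 := fun h => h4 (pvCharToNatInj (d := '4') h)
  have k5 : c.toNat ≠ 53 := fun h => h5 (pvCharToNatInj (d := '5') h)
  have k6 : c.toNat ≠ 54 := fun h => h6 (pvCharToNatInj (d := '6') h)
  have ha' : 49 ≤ c.toNat := (pvCharLeIff '1' c).mp ha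
  have hb' : c.toNat ≤ 54 := (pvCharLeIff c '6').mp hb
  omega

lemma pvNotIn35 {c : Char} (h3 : ¬(c = '3')) (h4 : ¬(c = '4')) (h5 : ¬(c = '5')) :
    ¬(('3':Char) ≤ c ∧ c ≤ '5') := by
  rintro ⟨ha, hb⟩
  have k3 : c.toNat ≠ 51 := fun h => h3 (pvCharToNatInj (d := '3') h)
  have k4 : c.toNat ≠ 52 := fun h => h4 (pvCharToNatInj (d := '4') h)
  have k5 : c.toNat ≠ 53 := fun h => h5 (pvCharToNatInj (d := '5') h)
  have ha' : 51 ≤ c.toNat := (pvCharLeIff '3' c).mp ha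
  have hb' : c.toNat ≤ 53 := (pvCharLeIff c '5').mp hb
  omega

lemma pvNotIn13 {c : Char} (h1 : ¬(c = '1')) (h2 : ¬(c = '2')) (h3 : ¬(c = '3')) :
    ¬(('1':Char) ≤ c ∧ c ≤ '3') := by
  rintro ⟨ha, hb⟩
  have k1 : c.toNat ≠ 49 := fun h => h1 (pvCharToNatInj (d := '1') h)
  have k2 : c.toNat ≠ 50 := fun h => h2 (pvCharToNatInj (d := '2') h)
  have k3 : c.toNat ≠ 51 := fun h => h3 (pvCharToNatInj (d := '3') h)
  have ha' : 49 ≤ c.toNat := (pvCharLeIff '1' c).mp ha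
  have hb' : c.toNat ≤ 51 := (pvCharLeIff c '3').mp hb
  omega

lemma pvCoreEq (s : String) :
    (if PySem.Set.contains (PySem.Set.ofList (GRADES_IC.map PySem.Str.upper)) s then "IC"
     else if PySem.Set.contains (PySem.Set.ofList (GRADES_TL.map PySem.Str.upper)) s then "TL"
     else if PySem.Set.contains (PySem.Set.ofList (GRADES_M1.map PySem.Str.upper)) s then "M1"
     else if PySem.Set.contains (PySem.Set.ofList (GRADES_M2.map PySem.Str.upper)) s then "M2"
     else if PySem.Set.contains (PySem.Set.ofList (GRADES_M3.map PySem.Str.upper)) s then "M3"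
     else "CXO") = pvBandOf s.toList := by
  have hIC : PySem.Set.ofList (GRADES_IC.map PySem.Str.upper) = ["A1.1","A1.2","A1.3","PT","AT","NAPS","NATS"] := by decide
  have hTL : PySem.Set.ofList (GRADES_TL.map PySem.Str.upper) = ["A2.1","A2.2","A3","A4","A5"] := by decide
  have hM1 : PySem.Set.ofList (GRADES_M1.map PySem.Str.upper) = ["E1","E2"] := by decide
  have hM2 : PySem.Set.ofList (GRADES_M2.map PySem.Str.upper) = ["E3","E4"] := by decide
  have hM3 : PySem.Set.ofList (GRADES_M3.map PySem.Str.upper) = ["E5","E6"] := by decide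
  rw [hIC, hTL, hM1, hM2, hM3]
  simp only [PySem.Set.contains, List.contains_cons, List.contains_nil, Bool.or_eq_true,
    beq_iff_eq, Bool.false_eq_true, or_false]
  simp only [pvE_A1_1, pvE_A1_2, pvE_A1_3, pvE_PT, pvE_AT, pvE_NAPS, pvE_NATS, pvE_A2_1, pvE_A2_2, pvE_A3, pvE_A4, pvE_A5, pvE_E1, pvE_E2, pvE_E3, pvE_E4, pvE_E5, pvE_E6]
  generalize s.toList = l
  rcases l with _|⟨c0,_|⟨c1,_|⟨c2,_|⟨c3,_|⟨c4,l⟩⟩⟩⟩⟩ <;>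
    simp only [pvBandOf, List.cons.injEq, List.cons_ne_nil, List.ne_cons_self, and_false, or_false, false_or, if_false, reduceCtorEq]
  · -- two characters
    by_cases hE : c0 = 'E'
    · subst hE
      by_cases h1 : c1 = '1'; · subst h1; decide
      by_cases h2 : c1 = '2'; · subst h2; decide
      by_cases h3 : c1 = '3'; · subst h3; decide
      by_cases h4 : c1 = '4'; · subst h4; decide
      by_cases h5 : c1 = '5'; · subst h5; decide
      by_cases h6 : c1 = '6'; · subst h6; decide
      simp [h1, h2, h3, h4, h5, h6, pvNotIn16 h1 h2 h3 h4 h5 h6]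
    · by_cases hA : c0 = 'A'
      · subst hA
        by_cases hT : c1 = 'T'; · subst hT; decide
        by_cases h3 : c1 = '3'; · subst h3; decide
        by_cases h4 : c1 = '4'; · subst h4; decide
        by_cases h5 : c1 = '5'; · subst h5; decide
        simp [hT, h3, h4, h5, pvNotIn35 h3 h4 h5]
      · by_cases hP : c0 = 'P'
        · subst hP
          by_cases hT : c1 = 'T'; · subst hT; decide
          simp [hT]
        · simp [hE, hA, hP]
  · -- four characters
    by_cases hN : c0 = 'N'
    · subst hN
      by_cases hA : c1 = 'A' <;> by_cases hS : c3 = 'S' <;>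
        by_cases hP : c2 = 'P' <;> by_cases hT : c2 = 'T' <;> simp [hA, hS, hP, hT]
    · by_cases hA : c0 = 'A'
      · subst hA
        by_cases hd : c2 = '.'
        · subst hd
          by_cases h1 : c1 = '1'
          · subst h1
            by_cases x1 : c3 = '1'; · subst x1; decide
            by_cases x2 : c3 = '2'; · subst x2; decide
            by_cases x3 : c3 = '3'; · subst x3; decide
            simp [x1, x2, x3, pvNotIn13 x1 x2 x3, Ne.symm x1, Ne.symm x2]
          · by_cases h2 : c1 = '2'
            · subst h2
              by_cases x1 : c3 = '1'; · subst x1; decide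
              by_cases x2 : c3 = '2'; · subst x2; decide
              simp [x1, x2, Ne.symm x1, Ne.symm x2]
            · simp [h1, h2]
        · simp [hN, hd]
      · simp [hN, hA]

-- ===== VERDICT (by name: the statement is the Claim_ definition above) =====
theorem grade_band_py_spec : Claim_equal_grade_band_py := by
  intro grade _
  unfold Spec_grade_band_py grade_band_py grade_band_py_alt
  exact pvCoreEq (PySem.Str.upper grade)
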